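-- pv_equiv track=rewrite | github.com/bc36/leetcode | Python/lc2500_2599.py | countAnagrams
-- ===== SOURCE A (Python) =====
-- import bisect, collections, functools, heapq, itertools, math, operator, string
--
-- def countAnagrams(s: str) -> int:
--     def perm_count_with_duplicate(s: str) -> int:
--         """
--         return 含重复元素的列表 s, 全排列的种类
--         假设长度 n, 含 x 种元素, 分别计数为[c1, c2, c3 ... cx]
--         则答案是C(n, c1) * C(n-c1, c2) * C(n-c1-c2, c3) * ... * C(cx, cx)
--         """
--         n = len(s)
--         ans = 1
--         for v in collections.Counter(s).values():
--             ans = ans * math.comb(n, v) % mod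
--             n -= v
--         return ans
--
--     mod = 10**9 + 7
--     ans = 1
--     for w in s.split():
--         ans = (ans * perm_count_with_duplicate(w)) % mod
--     return ans
-- ===== SOURCE B (Python) =====
-- def countAnagrams(s: str) -> int:
--     mod = 10**9 + 7
--     ans = 1
--     for w in s.split():
--         # running-count multinomial: after i chars, res = i! / prod(count!),
--         # updated by res = res * i // (new count of current char); always exact.
--         cnt = {}
--         res = 1
--         for i, ch in enumerate(w, 1):
--             cnt[ch] = cnt.get(ch, 0) + 1
--             res = res * i // cnt[ch]
--         ans = ans * (res % mod) % mod
--     return ans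
-- ===== Notes on version B (the rewrite author's own statement) =====
-- stated objective: alternative
-- what changed: replaces the per-word Counter pass plus iterated math.comb loop by a single incremental pass over the word's characters that maintains a running count dict and updates the multinomial as res = res * i // cnt[ch]
import Mathlib
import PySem

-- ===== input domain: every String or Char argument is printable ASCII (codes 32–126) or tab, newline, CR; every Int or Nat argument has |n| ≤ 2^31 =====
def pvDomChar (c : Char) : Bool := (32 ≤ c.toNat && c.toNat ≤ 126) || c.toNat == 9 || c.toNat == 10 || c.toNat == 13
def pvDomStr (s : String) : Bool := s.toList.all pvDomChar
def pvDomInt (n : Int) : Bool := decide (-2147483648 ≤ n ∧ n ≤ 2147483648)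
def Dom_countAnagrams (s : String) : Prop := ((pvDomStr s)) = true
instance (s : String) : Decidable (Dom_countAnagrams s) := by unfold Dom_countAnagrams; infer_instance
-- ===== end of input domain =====

-- B replaces A's per-word Counter pass + iterated math.comb loop by a single incremental pass
-- that maintains running counts and updates the multinomial via exact division; objective: alternative.

-- ===== PORT A =====
-- per-word helper: n = len(w); for v in Counter(w).values(): ans = ans * comb(n, v) % mod; n -= v.
-- math.comb(n, v) with 0 ≤ v ≤ n (always the case here: counts of w, n a remaining length) is Nat.choose;
-- the running n is kept as a Nat (it is len(w) minus a partial sum of counts, never negative).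
def permCountA (w : List Char) : Int :=
  ((PySem.Dict.counter w).values.foldl
    (fun (p : Nat × Int) v =>
      (p.1 - v.toNat, PySem.Int.mod (p.2 * (p.1.choose v.toNat : Int)) 1000000007))
    (w.length, 1)).2

def countAnagrams (s : String) : Int :=
  (PySem.Str.split₀ s).foldl
    (fun ans w => PySem.Int.mod (ans * permCountA w.toList) 1000000007) 1

-- ===== PORT B =====
-- inner loop body: cnt[ch] = cnt.get(ch, 0) + 1; res = res * i // cnt[ch]; i advances by 1
def permBStep (st : Int × PySem.Dict Char Int × Int) (ch : Char) : Int × PySem.Dict Char Int × Int :=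
  let cnt := st.2.1.insert ch (st.2.1.getD ch 0 + 1)
  (st.1 + 1, cnt, PySem.Int.floordiv (st.2.2 * st.1) (cnt.getD ch 0))

-- the word loop of B: enumerate(w, 1) with state (i, cnt, res), returning res
def permB (w : List Char) : Int :=
  (w.foldl permBStep (1, PySem.Dict.empty, 1)).2.2

def countAnagrams_alt (s : String) : Int :=
  (PySem.Str.split₀ s).foldl
    (fun ans w => PySem.Int.mod (ans * PySem.Int.mod (permB w.toList) 1000000007) 1000000007) 1

-- ===== PRECONDITION & SPEC =====
def Spec_countAnagrams (s : String) (out : Int) : Prop := out = countAnagrams_alt s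
instance (s : String) (out : Int) : Decidable (Spec_countAnagrams s out) := by unfold Spec_countAnagrams; infer_instance

-- ===== CLAIM (what is proved, stated in full; the proofs are below) =====
def Claim_equal_countAnagrams : Prop := ∀ (s : String), Dom_countAnagrams s → Spec_countAnagrams s (countAnagrams s)

-- ===== LEMMAS AND PROOFS =====

-- product of factorials of the character counts of u (the multinomial denominator)
def Pf (u : List Char) : Nat := ∏ k ∈ u.toFinset, (u.count k).factorial

lemma sum_count_toFinset (u : List Char) : (∑ a ∈ u.toFinset, u.count a) = u.length := by
  simp

lemma Pf_dvd (u : List Char) : Pf u ∣ u.length.factorial := by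
  have h := Nat.prod_factorial_dvd_factorial_sum u.toFinset (fun k => u.count k)
  rwa [sum_count_toFinset] at h

lemma Pf_append (u : List Char) (c : Char) : Pf (u ++ [c]) = Pf u * (u.count c + 1) := by
  classical
  unfold Pf
  have htf : (u ++ [c]).toFinset = insert c u.toFinset := by
    simp [List.toFinset_append]
  rw [htf, ← Finset.mul_prod_erase _ _ (Finset.mem_insert_self c u.toFinset),
    Finset.erase_insert_eq_erase]
  have hfc : ((u ++ [c]).count c).factorial = (u.count c + 1) * (u.count c).factorial := by
    simp [List.count_append, Nat.factorial_succ]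
  have hrest : ∏ k ∈ u.toFinset.erase c, ((u ++ [c]).count k).factorial
      = ∏ k ∈ u.toFinset.erase c, (u.count k).factorial := by
    refine Finset.prod_congr rfl (fun k hk => ?_)
    have hkc : k ≠ c := (Finset.mem_erase.1 hk).1
    simp [List.count_append, Ne.symm hkc]
  rw [hfc, hrest]
  by_cases hcu : c ∈ u.toFinset
  · rw [← Finset.mul_prod_erase _ _ hcu]; ring
  · have h0 : u.count c = 0 := by
      rw [List.count_eq_zero]
      exact fun h => hcu (List.mem_toFinset.2 h)
    rw [Finset.erase_eq_of_notMem hcu, h0]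
    simp [Nat.factorial]

-- B's inner loop invariant: with counts of the prefix u in cnt, index u.length+1 and
-- res = the exact multinomial of u, folding the rest v yields the multinomial of u ++ v
lemma permB_inv : ∀ (v u : List Char) (cnt : PySem.Dict Char Int),
    (∀ k, cnt.getD k 0 = (u.count k : Int)) →
    (v.foldl permBStep ((u.length : Int) + 1, cnt, ((u.length.factorial / Pf u : Nat) : Int))).2.2
      = (((u ++ v).length.factorial / Pf (u ++ v) : Nat) : Int) := by
  intro v
  induction v with
  | nil => intro u cnt _; simp
  | cons c v ih =>
    intro u cnt hcnt
    have hget : (cnt.insert c (cnt.getD c 0 + 1)).getD c 0 = ((u.count c + 1 : Nat) : Int) := by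
      rw [PySem.Dict.getD_insert]
      simp [hcnt c]
    have hcnt' : ∀ k, (cnt.insert c (cnt.getD c 0 + 1)).getD k 0 = ((u ++ [c]).count k : Int) := by
      intro k
      rw [PySem.Dict.getD_insert]
      by_cases hk : k = c
      · subst hk
        simp [hcnt k, List.count_append]
      · simp [hk, hcnt k, List.count_append, Ne.symm hk]
    have hres : PySem.Int.floordiv (((u.length.factorial / Pf u : Nat) : Int) * ((u.length : Int) + 1))
        ((cnt.insert c (cnt.getD c 0 + 1)).getD c 0)
        = (((u ++ [c]).length.factorial / Pf (u ++ [c]) : Nat) : Int) := by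
      rw [hget]
      have e1 : ((u.length.factorial / Pf u : Nat) : Int) * ((u.length : Int) + 1)
          = (((u.length.factorial / Pf u) * (u.length + 1) : Nat) : Int) := by
        push_cast; ring
      rw [e1, PySem.Int.floordiv_natCast]
      have hnat : u.length.factorial / Pf u * (u.length + 1) / (u.count c + 1)
          = (u ++ [c]).length.factorial / Pf (u ++ [c]) := by
        have hmul : u.length.factorial / Pf u * (u.length + 1) = (u.length + 1).factorial / Pf u := by
          rw [mul_comm, ← Nat.mul_div_assoc _ (Pf_dvd u), ← Nat.factorial_succ]
        rw [hmul, Nat.div_div_eq_div_mul, Pf_append]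
        simp
      rw [hnat]
    calc ((c :: v).foldl permBStep ((u.length : Int) + 1, cnt,
            ((u.length.factorial / Pf u : Nat) : Int))).2.2
        = (v.foldl permBStep (((u ++ [c]).length : Int) + 1,
            cnt.insert c (cnt.getD c 0 + 1),
            (((u ++ [c]).length.factorial / Pf (u ++ [c]) : Nat) : Int))).2.2 := by
          have hlen : ((u.length : Int) + 1) + 1 = ((u ++ [c]).length : Int) + 1 := by
            push_cast [List.length_append, List.length_singleton]
            ring
          simp only [List.foldl_cons, permBStep, hres]
          rw [hlen]
      _ = ((((u ++ [c]) ++ v).length.factorial / Pf ((u ++ [c]) ++ v) : Nat) : Int) :=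
          ih (u ++ [c]) _ hcnt'
      _ = (((u ++ c :: v).length.factorial / Pf (u ++ c :: v) : Nat) : Int) := by
          rw [← List.append_cons]

lemma permB_eq (w : List Char) : permB w = ((w.length.factorial / Pf w : Nat) : Int) := by
  have h := permB_inv w [] PySem.Dict.empty (by intro k; simp)
  simpa [permB, Pf] using h

-- ---- A's side: the per-word loop computes the same multinomial mod p ----

-- the product of binomials A computes per word, in Nat
def prodChoose : List Nat → Nat → Nat
  | [], _ => 1
  | c :: cs, n => n.choose c * prodChoose cs (n - c)

lemma prodChoose_mul_prod_factorial (cs : List Nat) :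
    ∀ m : Nat, prodChoose cs (cs.sum + m) * (cs.map Nat.factorial).prod * m.factorial
      = (cs.sum + m).factorial := by
  induction cs with
  | nil => intro m; simp [prodChoose]
  | cons c cs ih =>
    intro m
    have hsub : c + cs.sum + m - c = cs.sum + m := by omega
    have hn : c + cs.sum + m = c + (cs.sum + m) := by omega
    simp only [prodChoose, List.sum_cons, List.map_cons, List.prod_cons, hsub]
    have h := Nat.choose_mul_factorial_mul_factorial
      (show c ≤ c + (cs.sum + m) by omega)
    have hih := ih m
    calc (c + cs.sum + m).choose c * prodChoose cs (cs.sum + m) *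
            (c.factorial * (cs.map Nat.factorial).prod) * m.factorial
        = (c + cs.sum + m).choose c * c.factorial *
            (prodChoose cs (cs.sum + m) * (cs.map Nat.factorial).prod * m.factorial) := by ring
      _ = (c + cs.sum + m).choose c * c.factorial * (cs.sum + m).factorial := by rw [hih]
      _ = (c + cs.sum + m).factorial := by
            rw [hn]
            simpa using h

-- (x % p * y) % p = (x * y) % p
lemma emod_mul_emod (x y p : Int) : (x % p * y) % p = (x * y) % p := by
  conv_lhs => rw [Int.mul_emod]
  rw [Int.emod_emod_of_dvd _ dvd_rfl, ← Int.mul_emod]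

-- A's per-word loop over the (Nat) count list computes the product of binomials mod p
lemma foldA_eq (cs : List Nat) (hne : cs ≠ []) : ∀ (n : Nat) (a : Int),
    (cs.foldl (fun (p : Nat × Int) c =>
        (p.1 - c, (p.2 * (p.1.choose c : Int)) % 1000000007)) (n, a)).2
      = (a * (prodChoose cs n : Int)) % 1000000007 := by
  induction cs with
  | nil => exact absurd rfl hne
  | cons c cs ih =>
    intro n a
    simp only [List.foldl_cons]
    cases cs with
    | nil => simp [prodChoose]
    | cons c' cs' =>
      rw [ih (by simp)]
      push_cast [prodChoose]
      rw [emod_mul_emod, mul_assoc]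

-- Counter(w).values() is the count of each distinct char, in first-occurrence order
lemma values_counter_eq (w : List Char) :
    (PySem.Dict.counter w).values
      = (PySem.Set.ofList w).map (fun k => ((w.count k : Nat) : Int)) := by
  rw [PySem.Dict.values_eq_map_keys _ (PySem.Dict.nodup_keys_counter w) 0,
    PySem.Dict.keys_counter]
  exact List.map_congr_left (fun k hk => by simp [PySem.Dict.getD_counter])

-- the counts over the distinct chars sum to the length
lemma sum_counts (w : List Char) :
    ((PySem.Set.ofList w).map (fun k => w.count k)).sum = w.length := by
  have hperm : (PySem.Set.ofList w).Perm w.dedup := by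
    rw [List.perm_ext_iff_of_nodup (PySem.Set.nodup_ofList w) w.nodup_dedup]
    intro x; rw [PySem.Set.mem_ofList, List.mem_dedup]
  calc ((PySem.Set.ofList w).map (fun k => w.count k)).sum
      = (w.dedup.map (fun k => w.count k)).sum := (hperm.map _).sum_eq
    _ = w.length := List.sum_map_count_dedup_eq_length w

lemma permA_core (w : List Char) (hw : w ≠ []) :
    permCountA w = (((w.length.factorial / Pf w : Nat) : Int)) % 1000000007 := by
  classical
  have hp : (0 : Int) < 1000000007 := by norm_num
  set cs : List Nat := (PySem.Set.ofList w).map (fun k => w.count k) with hcs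
  have hvals : (PySem.Dict.counter w).values = cs.map (fun c => ((c : Nat) : Int)) := by
    rw [values_counter_eq w, hcs, List.map_map]; rfl
  have hne : cs ≠ [] := by
    have hmem : w.head hw ∈ PySem.Set.ofList w := by
      rw [PySem.Set.mem_ofList]; exact List.head_mem hw
    simp only [hcs, ne_eq, List.map_eq_nil_iff]
    exact List.ne_nil_of_mem hmem
  have hsum : cs.sum = w.length := sum_counts w
  have hTF : (PySem.Set.ofList w).toFinset = w.toFinset := by
    refine Finset.ext (fun x => ?_)
    simp [List.mem_toFinset, PySem.Set.mem_ofList]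
  have hprod : (cs.map Nat.factorial).prod = Pf w := by
    unfold Pf
    rw [← hTF, List.prod_toFinset _ (PySem.Set.nodup_ofList w), hcs, List.map_map]
    rfl
  have hDpos : 0 < Pf w := by
    rw [← hprod]
    exact List.prod_pos (by
      intro x hx
      rcases List.mem_map.1 hx with ⟨c, _, rfl⟩
      exact c.factorial_pos)
  have hdiv : prodChoose cs w.length = w.length.factorial / Pf w := by
    have h := prodChoose_mul_prod_factorial cs 0
    simp only [Nat.add_zero, Nat.factorial_zero, Nat.mul_one] at h
    rw [hprod] at h
    rw [← hsum, ← h, Nat.mul_div_cancel _ hDpos, hsum]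
  unfold permCountA
  rw [hvals, List.foldl_map]
  simp only [Int.toNat_natCast, PySem.Int.mod_eq_emod_of_pos hp]
  rw [foldA_eq cs hne w.length 1, one_mul, hdiv]

lemma word_eq (w : List Char) : permCountA w = PySem.Int.mod (permB w) 1000000007 := by
  rw [permB_eq]
  by_cases hw : w = []
  · subst hw; decide
  · rw [permA_core w hw, PySem.Int.mod_eq_emod_of_pos (by norm_num)]

-- ===== VERDICT (by name: the statement is the Claim_ definition above) =====
theorem countAnagrams_spec : Claim_equal_countAnagrams := by
  intro s _
  unfold Spec_countAnagrams countAnagrams countAnagrams_alt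
  apply PySem.List.foldl_congr_mem
  intro acc w hw
  rw [word_eq]
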